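-- pv_equiv track=rewrite | github.com/Pararcana/British-Informatics-Olympiad-Python | 2021/Q1 - Down Pat.py | isPat
-- ===== SOURCE A (Python) =====
-- def ordered(str1, str2):
--   arr1 = [ord(v) for v in str1]
--   arr2 = [ord(v) for v in str2]
--   return min(arr1) > max(arr2)
--
-- def isPat(str):
--   if len(str) == 1:
--     return True
--   else:
--     for i in range(1, len(str)):
--       if ordered(str[:i], str[i:]) and isPat(str[:i][::-1]) and isPat(str[i:][::-1]):
--         return True
--     return False
-- ===== SOURCE B (Python) =====
-- def isPat(str):
--   n = len(str)
--   if n <= 1: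
--     return n == 1
--   c = [ord(v) for v in str]
--   memo = {}
--
--   def pat(lo, hi, d):
--     # value of isPat on c[lo:hi] read forwards (d == 0) or backwards (d == 1)
--     if hi - lo == 1:
--       return True
--     key = (lo, hi, d)
--     if key in memo:
--       return memo[key]
--     L = hi - lo
--     # pre[k - 1] = min (d == 0) / max (d == 1) of c[lo:lo + k], k = 1 .. L - 1
--     pre = [c[lo]]
--     for j in range(lo + 1, hi - 1):
--       pre.append(min(pre[-1], c[j]) if d == 0 else max(pre[-1], c[j]))
--     # suf[k - 1] = max (d == 0) / min (d == 1) of c[lo + k:hi], k = 1 .. L - 1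
--     suf = [c[hi - 1]]
--     for j in range(hi - 2, lo, -1):
--       suf.append(max(suf[-1], c[j]) if d == 0 else min(suf[-1], c[j]))
--     suf.reverse()
--     res = False
--     for k in range(1, L):
--       if (pre[k - 1] > suf[k - 1] if d == 0 else suf[k - 1] > pre[k - 1]) \
--           and pat(lo, lo + k, 1 - d) and pat(lo + k, hi, 1 - d):
--         res = True
--         break
--     memo[key] = res
--     return res
--
--   return pat(0, n, 0)
-- ===== Notes on version B (the rewrite author's own statement) =====
-- stated objective: faster
-- what changed: A's exponential recursion on string slices is replaced by a top-down recursion memoized over (lo, hi, orientation) index states, with per-state prefix/suffix extrema arrays replacing the per-split min/max slice scans, so no strings are ever copied and no state is solved twice.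
import Mathlib
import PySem

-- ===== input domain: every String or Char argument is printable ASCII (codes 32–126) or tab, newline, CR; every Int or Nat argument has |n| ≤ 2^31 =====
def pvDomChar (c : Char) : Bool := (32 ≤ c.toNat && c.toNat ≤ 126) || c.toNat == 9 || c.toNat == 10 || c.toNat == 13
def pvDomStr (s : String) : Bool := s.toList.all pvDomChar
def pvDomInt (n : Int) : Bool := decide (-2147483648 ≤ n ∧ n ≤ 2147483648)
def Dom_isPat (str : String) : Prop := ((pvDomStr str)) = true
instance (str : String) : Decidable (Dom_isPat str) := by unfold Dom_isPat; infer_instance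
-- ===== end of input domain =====

-- B replaces A's exponential recursion on string slices by a memoized recursion over
-- (lo, hi, orientation) index states with per-state prefix/suffix extrema arrays (faster).

-- ===== PORT A =====
def pvCode (c : Char) : Int := (c.toNat : Int)

-- ordered(str1, str2) = min(map ord str1) > max(map ord str2); exact on nonempty arguments,
-- the only calls isPat makes (Python's min/max raise on an empty list).
def pvOrdered (str1 str2 : List Char) : Bool :=
  match PySem.List.min? (str1.map pvCode) (fun x => x), PySem.List.max? (str2.map pvCode) (fun x => x) with
  | some m1, some m2 => decide (m2 < m1)
  | _, _ => false

-- str[::-1] is List.reverse (PySem.List.slice?_none_none_neg_one)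
def isPatL (l : List Char) : Bool :=
  if l.length = 1 then true
  else
    (PySem.List.pyRange 1 (l.length : Int) 1).attach.any fun i =>
      pvOrdered (PySem.List.slice l none (some i.1)) (PySem.List.slice l (some i.1) none)
      && isPatL (PySem.List.slice l none (some i.1)).reverse
      && isPatL (PySem.List.slice l (some i.1) none).reverse
termination_by l.length
decreasing_by
  · have h := PySem.List.mem_pyRange_one.mp i.2
    rw [PySem.List.slice_to l (by omega)]
    simp only [List.length_reverse, List.length_take]
    omega
  · have h := PySem.List.mem_pyRange_one.mp i.2
    rw [PySem.List.slice_from l (by omega)]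
    simp only [List.length_reverse, List.length_drop]
    omega

def isPat (str : String) : Bool := isPatL str.toList

-- ===== PORT B =====
-- c[j] is PySem.List.pyGetD c j 0: every index the algorithm reads is in range, where pyGetD is exact.

-- the 'for t in range(1, L - 1)' loop of Source B building pre (running prefix extremum of c[lo:hi])
def pvPreList (c : List Int) (lo hi d : Int) : List Int :=
  ((PySem.List.pyRange 1 (hi - lo - 1) 1).foldl
    (fun (st : Int × List Int) t =>
      let x := if d == 0 then min st.1 (PySem.List.pyGetD c (lo + t) 0)
               else max st.1 (PySem.List.pyGetD c (lo + t) 0)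
      (x, st.2 ++ [x]))
    (PySem.List.pyGetD c lo 0, [PySem.List.pyGetD c lo 0])).2

-- the second 'for t in range(1, L - 1)' loop building suf, followed by suf.reverse()
def pvSufList (c : List Int) (lo hi d : Int) : List Int :=
  (((PySem.List.pyRange 1 (hi - lo - 1) 1).foldl
    (fun (st : Int × List Int) t =>
      let y := if d == 0 then max st.1 (PySem.List.pyGetD c (hi - 1 - t) 0)
               else min st.1 (PySem.List.pyGetD c (hi - 1 - t) 0)
      (y, st.2 ++ [y]))
    (PySem.List.pyGetD c (hi - 1) 0, [PySem.List.pyGetD c (hi - 1) 0])).2).reverse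

mutual
-- pat(lo, hi, d) of Source B; returns the updated memo dict and the result
def pvPat (c : List Int) (memo : PySem.Dict (Int × Int × Int) Bool) (lo hi d : Int) :
    PySem.Dict (Int × Int × Int) Bool × Bool :=
  if hi - lo == 1 then (memo, true)
  else
    match memo.get? (lo, hi, d) with   -- 'if key in memo: return memo[key]'
    | some b => (memo, b)
    | none =>
      let L := hi - lo
      let r := pvPatLoop c memo lo hi d (pvPreList c lo hi d) (pvSufList c lo hi d)
        (PySem.List.pyRange 1 L 1).attach
      (r.1.insert (lo, hi, d) r.2, r.2)
termination_by ((hi - lo).toNat, 1, 0)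
decreasing_by
  exact Prod.Lex.right _ (Prod.Lex.left _ _ Nat.zero_lt_one)

-- the 'for k in range(1, L)' loop with its early break, over the attached range
def pvPatLoop (c : List Int) (memo : PySem.Dict (Int × Int × Int) Bool) (lo hi d : Int)
    (pre suf : List Int) :
    List {k : Int // k ∈ PySem.List.pyRange 1 (hi - lo) 1} →
    PySem.Dict (Int × Int × Int) Bool × Bool
  | [] => (memo, false)
  | k :: ks =>
    let ok := if d == 0 then
        decide (PySem.List.pyGetD suf (k.1 - 1) 0 < PySem.List.pyGetD pre (k.1 - 1) 0)
      else
        decide (PySem.List.pyGetD pre (k.1 - 1) 0 < PySem.List.pyGetD suf (k.1 - 1) 0)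
    if ok then
      let r1 := pvPat c memo lo (lo + k.1) (1 - d)
      if r1.2 then
        let r2 := pvPat c r1.1 (lo + k.1) hi (1 - d)
        if r2.2 then (r2.1, true)
        else pvPatLoop c r2.1 lo hi d pre suf ks
      else pvPatLoop c r1.1 lo hi d pre suf ks
    else pvPatLoop c memo lo hi d pre suf ks
termination_by ks => ((hi - lo).toNat, 0, ks.length)
decreasing_by
  · have h := PySem.List.mem_pyRange_one.mp k.2
    exact Prod.Lex.left _ _ (by omega)
  · have h := PySem.List.mem_pyRange_one.mp k.2
    exact Prod.Lex.left _ _ (by omega)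
  · exact Prod.Lex.right _ (Prod.Lex.right _ (by simp [List.length_cons]))
  · exact Prod.Lex.right _ (Prod.Lex.right _ (by simp [List.length_cons]))
  · exact Prod.Lex.right _ (Prod.Lex.right _ (by simp [List.length_cons]))
end

def isPat_alt (str : String) : Bool :=
  let l := str.toList
  let n : Int := (l.length : Int)
  if n ≤ 1 then n == 1
  else (pvPat (l.map pvCode) PySem.Dict.empty 0 n 0).2

-- ===== PRECONDITION & SPEC =====
def Spec_isPat (str : String) (out : Bool) : Prop := out = isPat_alt str
instance (str : String) (out : Bool) : Decidable (Spec_isPat str out) := by unfold Spec_isPat; infer_instance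

-- ===== CLAIM (what is proved, stated in full; the proofs are below) =====
def Claim_equal_isPat : Prop := ∀ (str : String), Dom_isPat str → Spec_isPat str (isPat str)

-- ===== LEMMAS AND PROOFS =====

-- minimum / maximum value of a nonempty list, as Python's min/max compute it
def pvMinL : List Int → Int
  | [] => 0
  | x :: t => t.foldl min x

def pvMaxL : List Int → Int
  | [] => 0
  | x :: t => t.foldl max x

theorem pvMinL_mem {xs : List Int} (h : xs ≠ []) : pvMinL xs ∈ xs := by
  cases xs with
  | nil => exact absurd rfl h
  | cons x t =>
    rcases PySem.List.foldl_min_mem t x with h' | h'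
    · simp [pvMinL, h']
    · simp [pvMinL, List.mem_cons.mpr (Or.inr h')]

theorem pvMinL_le {xs : List Int} (h : xs ≠ []) : ∀ y ∈ xs, pvMinL xs ≤ y := by
  cases xs with
  | nil => exact absurd rfl h
  | cons x t =>
    intro y hy
    rcases List.mem_cons.mp hy with rfl | hy'
    · exact (PySem.List.foldl_min_le t y).1
    · exact (PySem.List.foldl_min_le t x).2 y hy' 

theorem pvMaxL_mem {xs : List Int} (h : xs ≠ []) : pvMaxL xs ∈ xs := by
  cases xs with
  | nil => exact absurd rfl h
  | cons x t =>
    rcases PySem.List.foldl_max_mem t x with h' | h'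
    · simp [pvMaxL, h']
    · simp [pvMaxL, List.mem_cons.mpr (Or.inr h')]

theorem pvMaxL_ge {xs : List Int} (h : xs ≠ []) : ∀ y ∈ xs, y ≤ pvMaxL xs := by
  cases xs with
  | nil => exact absurd rfl h
  | cons x t =>
    intro y hy
    rcases List.mem_cons.mp hy with rfl | hy'
    · exact (PySem.List.le_foldl_max t y).1
    · exact (PySem.List.le_foldl_max t x).2 y hy' 

theorem pvMinL_perm {xs ys : List Int} (hp : xs.Perm ys) (h : xs ≠ []) :
    pvMinL xs = pvMinL ys := by
  have h' : ys ≠ [] := by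
    intro hnil; exact h (List.Perm.eq_nil (hnil ▸ hp))
  exact le_antisymm
    (pvMinL_le h _ (hp.symm.subset (pvMinL_mem h')))
    (pvMinL_le h' _ (hp.subset (pvMinL_mem h)))

theorem pvMaxL_perm {xs ys : List Int} (hp : xs.Perm ys) (h : xs ≠ []) :
    pvMaxL xs = pvMaxL ys := by
  have h' : ys ≠ [] := by
    intro hnil; exact h (List.Perm.eq_nil (hnil ▸ hp))
  exact le_antisymm
    (pvMaxL_ge h' _ (hp.subset (pvMaxL_mem h)))
    (pvMaxL_ge h _ (hp.symm.subset (pvMaxL_mem h')))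

theorem pvMinL_append {xs : List Int} (h : xs ≠ []) (v : Int) :
    pvMinL (xs ++ [v]) = min (pvMinL xs) v := by
  cases xs with
  | nil => exact absurd rfl h
  | cons x t => simp [pvMinL, List.foldl_append]

theorem pvMaxL_append {xs : List Int} (h : xs ≠ []) (v : Int) :
    pvMaxL (xs ++ [v]) = max (pvMaxL xs) v := by
  cases xs with
  | nil => exact absurd rfl h
  | cons x t => simp [pvMaxL, List.foldl_append]

theorem pvMinL_cons {xs : List Int} (h : xs ≠ []) (v : Int) :
    pvMinL (v :: xs) = min (pvMinL xs) v := by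
  have hp : (v :: xs).Perm (xs ++ [v]) := by
    simpa using List.perm_append_comm (l₁ := [v]) (l₂ := xs)
  rw [pvMinL_perm hp (by simp), pvMinL_append h]

theorem pvMaxL_cons {xs : List Int} (h : xs ≠ []) (v : Int) :
    pvMaxL (v :: xs) = max (pvMaxL xs) v := by
  have hp : (v :: xs).Perm (xs ++ [v]) := by
    simpa using List.perm_append_comm (l₁ := [v]) (l₂ := xs)
  rw [pvMaxL_perm hp (by simp), pvMaxL_append h]

theorem pvOrdered_eq {s1 s2 : List Char} (h1 : s1 ≠ []) (h2 : s2 ≠ []) :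
    pvOrdered s1 s2 = decide (pvMaxL (s2.map pvCode) < pvMinL (s1.map pvCode)) := by
  cases s1 with
  | nil => exact absurd rfl h1
  | cons a t1 =>
    cases s2 with
    | nil => exact absurd rfl h2
    | cons b t2 =>
      simp only [pvOrdered, List.map_cons, PySem.List.min?_id_cons, PySem.List.max?_id_cons,
        pvMinL, pvMaxL]
      rfl

theorem pvOrdered_reverse (s1 s2 : List Char) (h1 : s1 ≠ []) (h2 : s2 ≠ []) :
    pvOrdered s1.reverse s2.reverse = pvOrdered s1 s2 := by
  rw [pvOrdered_eq (by simp [h1]) (by simp [h2]), pvOrdered_eq h1 h2,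
    List.map_reverse, List.map_reverse,
    pvMaxL_perm (List.reverse_perm _) (by simp [h2]),
    pvMinL_perm (List.reverse_perm _) (by simp [h1])]

-- the slice l[lo:hi] for 0 ≤ lo ≤ hi ≤ len
def pvSeg {α : Type} (l : List α) (lo hi : Int) : List α :=
  (l.drop lo.toNat).take (hi - lo).toNat

theorem pvSeg_length {α : Type} (l : List α) {lo hi : Int} (h0 : 0 ≤ lo) (h2 : hi ≤ (l.length : Int)) :
    (pvSeg l lo hi).length = (hi - lo).toNat := by
  simp only [pvSeg, List.length_take, List.length_drop]
  omega

theorem pvSeg_ne_nil {α : Type} (l : List α) {lo hi : Int} (h0 : 0 ≤ lo) (h1 : lo < hi)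
    (h2 : hi ≤ (l.length : Int)) : pvSeg l lo hi ≠ [] := by
  have hl := pvSeg_length l h0 h2
  intro hnil
  rw [hnil] at hl
  simp at hl
  omega

theorem pvSeg_map {α β : Type} (f : α → β) (l : List α) (lo hi : Int) :
    (pvSeg l lo hi).map f = pvSeg (l.map f) lo hi := by
  simp [pvSeg, List.map_take, List.map_drop]

theorem pvSeg_take {α : Type} (l : List α) {lo m hi : Int} (h0 : 0 ≤ lo) (h1 : lo ≤ m) (h2 : m ≤ hi) :
    (pvSeg l lo hi).take (m - lo).toNat = pvSeg l lo m := by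
  have hmin : (m - lo).toNat ≤ (hi - lo).toNat := by omega
  simp only [pvSeg, List.take_take, Nat.min_eq_left hmin]

theorem pvSeg_drop {α : Type} (l : List α) {lo m hi : Int} (h0 : 0 ≤ lo) (h1 : lo ≤ m) (h2 : m ≤ hi) :
    (pvSeg l lo hi).drop (m - lo).toNat = pvSeg l m hi := by
  have e1 : (hi - lo).toNat - (m - lo).toNat = (hi - m).toNat := by omega
  have e2' : lo.toNat + (m - lo).toNat = m.toNat := by omega
  simp only [pvSeg, List.drop_take, List.drop_drop, e1, e2']

theorem pvSeg_single {α : Type} (l : List α) {m : Int} (d : α) (h0 : 0 ≤ m)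
    (h : m < (l.length : Int)) : pvSeg l m (m + 1) = [l.getD m.toNat d] := by
  have hm : m.toNat < l.length := by omega
  have h1 : (m + 1 - m).toNat = 1 := by omega
  rw [pvSeg, h1, List.drop_eq_getElem_cons hm]
  simp only [List.take_succ_cons, List.take_zero]
  rw [List.getD_eq_getElem l d hm]

theorem pvSeg_append {α : Type} (l : List α) {lo m : Int} (d : α) (h0 : 0 ≤ lo) (h1 : lo ≤ m)
    (h : m < (l.length : Int)) : pvSeg l lo (m + 1) = pvSeg l lo m ++ [l.getD m.toNat d] := by
  have hm : m.toNat < l.length := by omega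
  have h1 : (m + 1 - lo).toNat = (m - lo).toNat + 1 := by omega
  rw [pvSeg, h1, List.take_add_one, pvSeg]
  congr 1
  rw [List.getElem?_drop]
  have hidx : lo.toNat + (m - lo).toNat = m.toNat := by omega
  rw [hidx, List.getElem?_eq_getElem hm]
  simp [List.getElem?_eq_getElem hm]

theorem pvSeg_cons {α : Type} (l : List α) {m hi : Int} (d : α) (h0 : 0 ≤ m) (h1 : m < hi)
    (h : m < (l.length : Int)) : pvSeg l m hi = l.getD m.toNat d :: pvSeg l (m + 1) hi := by
  have hm : m.toNat < l.length := by omega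
  have h1 : (hi - m).toNat = (hi - (m + 1)).toNat + 1 := by omega
  rw [pvSeg, h1, List.drop_eq_getElem_cons hm, List.take_succ_cons, pvSeg]
  have h2 : (m + 1).toNat = m.toNat + 1 := by omega
  rw [h2]
  simp [List.getElem?_eq_getElem hm]

theorem pvSeg_all {α : Type} (l : List α) : pvSeg l 0 (l.length : Int) = l := by
  simp [pvSeg]

-- the value pat(lo, hi, d) must compute: A's isPat on the slice, read forwards (d = 0) or backwards
def pvSpec (l : List Char) (lo hi d : Int) : Bool :=
  if d == 0 then isPatL (pvSeg l lo hi) else isPatL (pvSeg l lo hi).reverse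

-- the split condition of A at (lo, hi, split lo+k, orientation d), on code lists
def pvOkSpec (c : List Int) (lo hi k d : Int) : Bool :=
  if d == 0 then decide (pvMaxL (pvSeg c (lo + k) hi) < pvMinL (pvSeg c lo (lo + k)))
  else decide (pvMaxL (pvSeg c lo (lo + k)) < pvMinL (pvSeg c (lo + k) hi))

theorem isPatL_one {l : List Char} (h : l.length = 1) : isPatL l = true := by
  rw [isPatL]; simp [h]

theorem isPatL_nil : isPatL ([] : List Char) = false := by
  rw [isPatL]
  simp [PySem.List.pyRange_one_eq_nil]

theorem pvSpec_base (l : List Char) {lo : Int} (d : Int) (h0 : 0 ≤ lo) (h : lo < (l.length : Int)) :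
    pvSpec l lo (lo + 1) d = true := by
  have hs := pvSeg_single l (Classical.arbitrary Char) h0 h
  unfold pvSpec
  rw [hs]
  split
  · exact isPatL_one (by simp)
  · rw [List.reverse_singleton]
    exact isPatL_one (by simp)

theorem isPatL_iff {l : List Char} (h : 2 ≤ l.length) :
    isPatL l = true ↔ ∃ i : Int, 1 ≤ i ∧ i < (l.length : Int) ∧
      pvOrdered (l.take i.toNat) (l.drop i.toNat) = true ∧
      isPatL (l.take i.toNat).reverse = true ∧ isPatL (l.drop i.toNat).reverse = true := by
  rw [isPatL, if_neg (by omega), List.any_eq_true]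
  constructor
  · rintro ⟨⟨i, hi⟩, -, hp⟩
    have hb := PySem.List.mem_pyRange_one.mp hi
    simp only at hp
    rw [PySem.List.slice_to l (by omega), PySem.List.slice_from l (by omega)] at hp
    refine ⟨i, hb.1, hb.2, ?_, ?_, ?_⟩ <;> simp_all [Bool.and_eq_true]
  · rintro ⟨i, h1, h2, ho, ha, hb2⟩
    refine ⟨⟨i, PySem.List.mem_pyRange_one.mpr ⟨h1, h2⟩⟩, List.mem_attach _ _, ?_⟩
    simp only
    rw [PySem.List.slice_to l (by omega), PySem.List.slice_from l (by omega)]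
    simp [ho, ha, hb2]

-- the recurrence of A's isPat, per orientation, on index states
theorem pvSpec_rec (l : List Char) {lo hi : Int} (d : Int) (hd : d = 0 ∨ d = 1) (h0 : 0 ≤ lo)
    (h2 : hi ≤ (l.length : Int)) (hL : 2 ≤ hi - lo) :
    (pvSpec l lo hi d = true ↔ ∃ k : Int, 1 ≤ k ∧ k < hi - lo ∧
      pvOkSpec (l.map pvCode) lo hi k d = true ∧
      pvSpec l lo (lo + k) (1 - d) = true ∧ pvSpec l (lo + k) hi (1 - d) = true) := by
  have hlen : (pvSeg l lo hi).length = (hi - lo).toNat := pvSeg_length l h0 h2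
  have s0 : ∀ a b, pvSpec l a b 0 = isPatL (pvSeg l a b) := fun a b => by simp [pvSpec]
  have s1 : ∀ a b, pvSpec l a b 1 = isPatL (pvSeg l a b).reverse := fun a b => by simp [pvSpec]
  have o0 : ∀ k, pvOkSpec (l.map pvCode) lo hi k 0 =
      decide (pvMaxL (pvSeg (l.map pvCode) (lo + k) hi) < pvMinL (pvSeg (l.map pvCode) lo (lo + k))) :=
    fun k => by simp [pvOkSpec]
  have o1 : ∀ k, pvOkSpec (l.map pvCode) lo hi k 1 =
      decide (pvMaxL (pvSeg (l.map pvCode) lo (lo + k)) < pvMinL (pvSeg (l.map pvCode) (lo + k) hi)) :=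
    fun k => by simp [pvOkSpec]
  rcases hd with rfl | rfl
  · -- d = 0
    rw [show (1 : Int) - 0 = 1 by norm_num, s0, isPatL_iff (by omega)]
    constructor
    · rintro ⟨i, hi1, hi2, ho, ha, hb⟩
      rw [hlen] at hi2
      have hik : i < hi - lo := by omega
      have htake : (pvSeg l lo hi).take i.toNat = pvSeg l lo (lo + i) := by
        have e := pvSeg_take l (lo := lo) (m := lo + i) (hi := hi) h0 (by omega) (by omega)
        rwa [show lo + i - lo = i by ring] at e
      have hdrop : (pvSeg l lo hi).drop i.toNat = pvSeg l (lo + i) hi := by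
        have e := pvSeg_drop l (lo := lo) (m := lo + i) (hi := hi) h0 (by omega) (by omega)
        rwa [show lo + i - lo = i by ring] at e
      have hne1 : pvSeg l lo (lo + i) ≠ [] := pvSeg_ne_nil l h0 (by omega) (by omega)
      have hne2 : pvSeg l (lo + i) hi ≠ [] := pvSeg_ne_nil l (by omega) (by omega) h2
      refine ⟨i, hi1, hik, ?_, ?_, ?_⟩
      · rw [o0]
        rw [htake, hdrop, pvOrdered_eq hne1 hne2, pvSeg_map, pvSeg_map] at ho
        exact ho
      · rw [s1]; rwa [htake] at ha
      · rw [s1]; rwa [hdrop] at hb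
    · rintro ⟨k, hk1, hk2, ho, ha, hb⟩
      have htake : (pvSeg l lo hi).take k.toNat = pvSeg l lo (lo + k) := by
        have e := pvSeg_take l (lo := lo) (m := lo + k) (hi := hi) h0 (by omega) (by omega)
        rwa [show lo + k - lo = k by ring] at e
      have hdrop : (pvSeg l lo hi).drop k.toNat = pvSeg l (lo + k) hi := by
        have e := pvSeg_drop l (lo := lo) (m := lo + k) (hi := hi) h0 (by omega) (by omega)
        rwa [show lo + k - lo = k by ring] at e
      have hne1 : pvSeg l lo (lo + k) ≠ [] := pvSeg_ne_nil l h0 (by omega) (by omega)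
      have hne2 : pvSeg l (lo + k) hi ≠ [] := pvSeg_ne_nil l (by omega) (by omega) h2
      refine ⟨k, hk1, by rw [hlen]; omega, ?_, ?_, ?_⟩
      · rw [htake, hdrop, pvOrdered_eq hne1 hne2, pvSeg_map, pvSeg_map]
        rw [o0] at ho
        exact ho
      · rw [htake]; rw [s1] at ha; exact ha
      · rw [hdrop]; rw [s1] at hb; exact hb
  · -- d = 1
    rw [show (1 : Int) - 1 = 0 by norm_num, s1,
      isPatL_iff (by rw [List.length_reverse, hlen]; omega)]
    rw [List.length_reverse, hlen]
    constructor
    · rintro ⟨i, hi1, hi2, ho, ha, hb⟩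
      have hik : i < hi - lo := by omega
      set k : Int := hi - lo - i with hk
      have hne1 : pvSeg l lo (lo + k) ≠ [] := pvSeg_ne_nil l h0 (by omega) (by omega)
      have hne2 : pvSeg l (lo + k) hi ≠ [] := pvSeg_ne_nil l (by omega) (by omega) h2
      have e1 : (pvSeg l lo hi).reverse.take i.toNat = (pvSeg l (lo + k) hi).reverse := by
        rw [List.take_reverse]
        congr 1
        have e := pvSeg_drop l (lo := lo) (m := lo + k) (hi := hi) h0 (by omega) (by omega)
        rw [hlen, show (hi - lo).toNat - i.toNat = (lo + k - lo).toNat by omega]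
        exact e
      have e2 : (pvSeg l lo hi).reverse.drop i.toNat = (pvSeg l lo (lo + k)).reverse := by
        rw [List.drop_reverse]
        congr 1
        have e := pvSeg_take l (lo := lo) (m := lo + k) (hi := hi) h0 (by omega) (by omega)
        rw [hlen, show (hi - lo).toNat - i.toNat = (lo + k - lo).toNat by omega]
        exact e
      refine ⟨k, by omega, by omega, ?_, ?_, ?_⟩
      · rw [o1]
        rw [e1, e2, pvOrdered_reverse _ _ hne2 hne1,
          pvOrdered_eq hne2 hne1, pvSeg_map, pvSeg_map] at ho
        exact ho
      · rw [s0]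
        rw [e2, List.reverse_reverse] at hb
        exact hb
      · rw [s0]
        rw [e1, List.reverse_reverse] at ha
        exact ha
    · rintro ⟨k, hk1, hk2, ho, ha, hb⟩
      set i : Int := hi - lo - k with hik
      have hne1 : pvSeg l lo (lo + k) ≠ [] := pvSeg_ne_nil l h0 (by omega) (by omega)
      have hne2 : pvSeg l (lo + k) hi ≠ [] := pvSeg_ne_nil l (by omega) (by omega) h2
      have e1 : (pvSeg l lo hi).reverse.take i.toNat = (pvSeg l (lo + k) hi).reverse := by
        rw [List.take_reverse]
        congr 1
        have e := pvSeg_drop l (lo := lo) (m := lo + k) (hi := hi) h0 (by omega) (by omega)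
        rw [hlen, show (hi - lo).toNat - i.toNat = (lo + k - lo).toNat by omega]
        exact e
      have e2 : (pvSeg l lo hi).reverse.drop i.toNat = (pvSeg l lo (lo + k)).reverse := by
        rw [List.drop_reverse]
        congr 1
        have e := pvSeg_take l (lo := lo) (m := lo + k) (hi := hi) h0 (by omega) (by omega)
        rw [hlen, show (hi - lo).toNat - i.toNat = (lo + k - lo).toNat by omega]
        exact e
      refine ⟨i, by omega, by omega, ?_, ?_, ?_⟩
      · rw [e1, e2, pvOrdered_reverse _ _ hne2 hne1,
          pvOrdered_eq hne2 hne1, pvSeg_map, pvSeg_map]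
        rw [o1] at ho
        exact ho
      · rw [e1, List.reverse_reverse]
        rw [s0] at hb
        exact hb
      · rw [e2, List.reverse_reverse]
        rw [s0] at ha
        exact ha

-- every value stored in the memo dict is the specified one
def MemoOK (l : List Char) (memo : PySem.Dict (Int × Int × Int) Bool) : Prop :=
  ∀ lo hi d b, memo.get? (lo, hi, d) = some b → b = pvSpec l lo hi d

theorem memoOK_empty (l : List Char) : MemoOK l PySem.Dict.empty := by
  intro lo hi d b h
  rw [PySem.Dict.get?_empty] at h
  exact absurd h (by simp)

theorem memoOK_insert {l : List Char} {memo} (h : MemoOK l memo) {lo hi d : Int} {b : Bool}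
    (hb : b = pvSpec l lo hi d) : MemoOK l (memo.insert (lo, hi, d) b) := by
  intro lo' hi' d' b' hgot
  rw [PySem.Dict.get?_insert] at hgot
  split at hgot
  · next heq =>
    obtain ⟨rfl, rfl, rfl⟩ := Prod.mk.injEq .. ▸ (by
      injection heq with h1 h2
      injection h2 with h2 h3
      exact ⟨h1, h2, h3⟩ : lo' = lo ∧ hi' = hi ∧ d' = d)
    cases hgot
    exact hb
  · exact h _ _ _ _ hgot

-- shape of the array-building folds
theorem pvFoldPair (g : Int → Int → Int) (x0 : Int) (B : Int) :
    ((PySem.List.pyRange 1 B 1).foldl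
      (fun (st : Int × List Int) t => (g st.1 t, st.2 ++ [g st.1 t])) (x0, [x0]))
    = ((PySem.List.pyRange 1 B 1).foldl g x0,
       [x0] ++ (PySem.List.pyRange 1 B 1).map (fun t => (PySem.List.pyRange 1 (t + 1) 1).foldl g x0)) := by
  by_cases hB : B ≤ 1
  · rw [PySem.List.pyRange_one_eq_nil hB]
    simp
  · obtain ⟨N, hN⟩ : ∃ N : Nat, B = 1 + ((N : Int) + 1) := ⟨(B - 2).toNat, by omega⟩
    subst hN
    clear hB
    induction N with
    | zero =>
      have h12 : PySem.List.pyRange (1 : Int) (1 + ((0 : Nat) + 1)) 1 = [1] := by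
        rw [show (1 : Int) + ((0 : Nat) + 1) = 1 + 1 by norm_num,
          PySem.List.pyRange_one_succ_right le_rfl, PySem.List.pyRange_one_eq_nil le_rfl]
        simp
      have h2 : PySem.List.pyRange (1 : Int) 2 1 = [1] := by
        rw [show (2 : Int) = 1 + 1 by norm_num,
          PySem.List.pyRange_one_succ_right le_rfl, PySem.List.pyRange_one_eq_nil le_rfl]
        simp
      rw [h12]
      simp [h2]
    | succ n ih =>
      rw [show (1 : Int) + (((n : Nat) + 1 : Nat) + 1) = (1 + ((n : Int) + 1)) + 1 by push_cast; ring,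
        PySem.List.pyRange_one_succ_right (by omega), List.foldl_append, List.map_append, ih]
      rw [Prod.ext_iff]
      constructor
      · simp [List.foldl_append]
      · simp only [List.foldl_cons, List.foldl_nil, List.map_cons, List.map_nil]
        rw [PySem.List.pyRange_one_succ_right (by omega : (1 : Int) ≤ 1 + ((n : Int) + 1)),
          List.foldl_append]
        simp

-- value of the forward (prefix) fold
theorem pvFoldVal_fwd (c : List Int) (lo : Int) (f : Int → Int → Int) (mf : List Int → Int)
    (hmf1 : ∀ v, mf [v] = v) (hmf2 : ∀ xs v, xs ≠ [] → mf (xs ++ [v]) = f (mf xs) v)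
    (hlo : 0 ≤ lo) : ∀ (t : Nat), lo + (t : Int) + 1 ≤ (c.length : Int) →
    (PySem.List.pyRange 1 ((t : Int) + 1) 1).foldl (fun x u => f x (PySem.List.pyGetD c (lo + u) 0))
      (PySem.List.pyGetD c lo 0) = mf (pvSeg c lo (lo + (t : Int) + 1)) := by
  intro t
  induction t with
  | zero =>
    intro ht
    rw [show ((0 : Nat) : Int) + 1 = 1 by norm_num, PySem.List.pyRange_one_eq_nil le_rfl]
    simp only [List.foldl_nil, Nat.cast_zero, add_zero]
    rw [pvSeg_single c 0 hlo (by push_cast at ht ⊢; omega), hmf1,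
      PySem.List.pyGetD_of_nonneg c 0 hlo]
  | succ n ih =>
    intro ht
    have hn : lo + (n : Int) + 1 ≤ (c.length : Int) := by push_cast at ht ⊢; omega
    rw [show ((n + 1 : Nat) : Int) + 1 = ((n : Int) + 1) + 1 by push_cast; ring,
      show lo + ((n + 1 : Nat) : Int) + 1 = (lo + (n : Int) + 1) + 1 by push_cast; ring,
      PySem.List.pyRange_one_succ_right (by omega), List.foldl_append, ih hn]
    simp only [List.foldl_cons, List.foldl_nil]
    have hseg := pvSeg_append c (lo := lo) (m := lo + (n : Int) + 1) 0 hlo (by omega)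
      (by push_cast at ht ⊢; omega)
    rw [hseg,
      hmf2 _ _ (pvSeg_ne_nil c hlo (by omega) hn),
      PySem.List.pyGetD_of_nonneg c 0 (by omega)]
    congr 1
    congr 1
    omega

-- value of the backward (suffix) fold
theorem pvFoldVal_bwd (c : List Int) (hi : Int) (f : Int → Int → Int) (mf : List Int → Int)
    (hmf1 : ∀ v, mf [v] = v) (hmf2 : ∀ xs v, xs ≠ [] → mf (v :: xs) = f (mf xs) v)
    (hhi : hi ≤ (c.length : Int)) : ∀ (t : Nat), 0 ≤ hi - 1 - (t : Int) →
    (PySem.List.pyRange 1 ((t : Int) + 1) 1).foldl (fun y u => f y (PySem.List.pyGetD c (hi - 1 - u) 0))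
      (PySem.List.pyGetD c (hi - 1) 0) = mf (pvSeg c (hi - 1 - (t : Int)) hi) := by
  intro t
  induction t with
  | zero =>
    intro ht
    rw [show ((0 : Nat) : Int) + 1 = 1 by norm_num, PySem.List.pyRange_one_eq_nil le_rfl]
    simp only [List.foldl_nil, Nat.cast_zero, sub_zero]
    have hs : pvSeg c (hi - 1) hi = [c.getD (hi - 1).toNat 0] := by
      have e := pvSeg_single c (m := hi - 1) 0 (by push_cast at ht ⊢; omega) (by omega)
      rwa [show hi - 1 + 1 = hi by ring] at e
    rw [hs, hmf1, PySem.List.pyGetD_of_nonneg c 0 (by push_cast at ht ⊢; omega)]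
  | succ n ih =>
    intro ht
    have hn : (0 : Int) ≤ hi - 1 - (n : Int) := by push_cast at ht ⊢; omega
    rw [show ((n + 1 : Nat) : Int) + 1 = ((n : Int) + 1) + 1 by push_cast; ring,
      PySem.List.pyRange_one_succ_right (by omega), List.foldl_append, ih hn]
    simp only [List.foldl_cons, List.foldl_nil]
    have h0' : (0 : Int) ≤ hi - 1 - ((n : Int) + 1) := by push_cast at ht ⊢; omega
    have hcons := pvSeg_cons c (m := hi - 1 - ((n : Int) + 1)) (hi := hi) 0 h0' (by omega)
      (by omega)
    rw [show hi - 1 - ((n + 1 : Nat) : Int) = hi - 1 - ((n : Int) + 1) by push_cast; ring] at *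
    rw [hcons, show (hi - 1 - ((n : Int) + 1)) + 1 = hi - 1 - (n : Int) by ring,
      hmf2 _ _ (pvSeg_ne_nil c hn (by omega) hhi),
      PySem.List.pyGetD_of_nonneg c 0 h0']

theorem pvGetD_x0_map (x0 : Int) (F : Int → Int) (B k : Int) (hk1 : 1 ≤ k) (hk2 : k ≤ B) :
    ([x0] ++ (PySem.List.pyRange 1 B 1).map F).getD (k - 1).toNat 0 =
      if k = 1 then x0 else F (k - 1) := by
  by_cases hk : k = 1
  · subst hk
    simp
  · rw [if_neg hk]
    have hidx : (k - 1).toNat = (k - 2).toNat + 1 := by omega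
    rw [hidx, List.singleton_append, List.getD_cons_succ, List.getD_eq_getElem?_getD,
      List.getElem?_map]
    have hlt : (k - 2).toNat < (PySem.List.pyRange 1 B 1).length := by
      rw [PySem.List.length_pyRange_one]
      omega
    rw [List.getElem?_eq_getElem hlt, PySem.List.getElem_pyRange_one _ _ _ hlt]
    simp only [Option.map_some, Option.getD_some]
    congr 1
    omega

-- value of the pre array at index k-1: the running extremum of c[lo:lo+k]
theorem pvArr_fwd (c : List Int) (lo L : Int) (f : Int → Int → Int) (mf : List Int → Int)
    (hmf1 : ∀ v, mf [v] = v) (hmf2 : ∀ xs v, xs ≠ [] → mf (xs ++ [v]) = f (mf xs) v)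
    (hlo : 0 ≤ lo) (hL : 2 ≤ L) (hlen : lo + L ≤ (c.length : Int)) (k : Int)
    (hk1 : 1 ≤ k) (hk2 : k < L) :
    PySem.List.pyGetD (((PySem.List.pyRange 1 (L - 1) 1).foldl
      (fun (st : Int × List Int) t =>
        (f st.1 (PySem.List.pyGetD c (lo + t) 0), st.2 ++ [f st.1 (PySem.List.pyGetD c (lo + t) 0)]))
      (PySem.List.pyGetD c lo 0, [PySem.List.pyGetD c lo 0])).2) (k - 1) 0 =
      mf (pvSeg c lo (lo + k)) := by
  rw [pvFoldPair (fun a t => f a (PySem.List.pyGetD c (lo + t) 0)) (PySem.List.pyGetD c lo 0) (L - 1),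
    PySem.List.pyGetD_of_nonneg _ _ (by omega),
    pvGetD_x0_map _ _ (L - 1) k hk1 (by omega)]
  by_cases hk : k = 1
  · subst hk
    rw [if_pos rfl]
    have hv := pvFoldVal_fwd c lo f mf hmf1 hmf2 hlo 0 (by omega)
    rw [show ((0 : Nat) : Int) + 1 = 1 by norm_num, PySem.List.pyRange_one_eq_nil le_rfl] at hv
    simpa using hv
  · rw [if_neg hk]
    have hv := pvFoldVal_fwd c lo f mf hmf1 hmf2 hlo (k - 1).toNat (by omega)
    rw [show (((k - 1).toNat : Nat) : Int) = k - 1 by omega,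
      show lo + (k - 1) + 1 = lo + k by ring] at hv
    exact hv

-- value of the suf array at index k-1: the running extremum of c[lo+k:hi]
theorem pvArr_bwd (c : List Int) (lo hi : Int) (f : Int → Int → Int) (mf : List Int → Int)
    (hmf1 : ∀ v, mf [v] = v) (hmf2 : ∀ xs v, xs ≠ [] → mf (v :: xs) = f (mf xs) v)
    (hlo : 0 ≤ lo) (hL : 2 ≤ hi - lo) (hlen : hi ≤ (c.length : Int)) (k : Int)
    (hk1 : 1 ≤ k) (hk2 : k < hi - lo) :
    PySem.List.pyGetD ((((PySem.List.pyRange 1 (hi - lo - 1) 1).foldl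
      (fun (st : Int × List Int) t =>
        (f st.1 (PySem.List.pyGetD c (hi - 1 - t) 0), st.2 ++ [f st.1 (PySem.List.pyGetD c (hi - 1 - t) 0)]))
      (PySem.List.pyGetD c (hi - 1) 0, [PySem.List.pyGetD c (hi - 1) 0])).2).reverse) (k - 1) 0 =
      mf (pvSeg c (lo + k) hi) := by
  rw [pvFoldPair (fun a t => f a (PySem.List.pyGetD c (hi - 1 - t) 0)) (PySem.List.pyGetD c (hi - 1) 0) (hi - lo - 1),
    PySem.List.pyGetD_of_nonneg _ _ (by omega)]
  have hlenL : ([PySem.List.pyGetD c (hi - 1) 0] ++ (PySem.List.pyRange 1 (hi - lo - 1) 1).map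
      (fun t => (PySem.List.pyRange 1 (t + 1) 1).foldl
        (fun a t => f a (PySem.List.pyGetD c (hi - 1 - t) 0)) (PySem.List.pyGetD c (hi - 1) 0))).length
      = (hi - lo - 1).toNat := by
    simp [PySem.List.length_pyRange_one]
    omega
  rw [List.getD_eq_getElem?_getD]
  have hik : (k - 1).toNat < (hi - lo - 1).toNat := by omega
  rw [List.getElem?_reverse (by rw [hlenL]; omega), hlenL]
  rw [← List.getD_eq_getElem?_getD]
  have hrev : ((hi - lo - 1).toNat - 1 - (k - 1).toNat) = ((hi - lo - k) - 1).toNat := by omega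
  rw [hrev, show ((hi - lo - k) - 1).toNat = ((hi - lo - k) - 1).toNat + 1 - 1 by omega,
    show ((hi - lo - k) - 1).toNat + 1 - 1 = ((hi - lo - k) : Int).toNat - 1 by omega]
  have hkk : (1 : Int) ≤ hi - lo - k := by omega
  rw [show ((hi - lo - k) : Int).toNat - 1 = ((hi - lo - k) - 1).toNat by omega,
    show (((hi - lo - k) - 1) : Int).toNat = ((hi - lo - k) - 1).toNat from rfl]
  have := pvGetD_x0_map (PySem.List.pyGetD c (hi - 1) 0)
      (fun t => (PySem.List.pyRange 1 (t + 1) 1).foldl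
        (fun a t => f a (PySem.List.pyGetD c (hi - 1 - t) 0)) (PySem.List.pyGetD c (hi - 1) 0))
      (hi - lo - 1) (hi - lo - k) hkk (by omega)
  rw [show ((hi - lo - k) - 1).toNat = ((hi - lo - k) - 1).toNat from rfl]
  rw [show (((hi - lo - k) : Int) - 1).toNat = ((hi - lo - k) - 1).toNat from rfl] at this
  rw [this]
  by_cases hke : hi - lo - k = 1
  · rw [if_pos hke]
    have hv := pvFoldVal_bwd c hi f mf hmf1 hmf2 hlen 0 (by simp only [Nat.cast_zero, sub_zero]; omega)
    rw [show ((0 : Nat) : Int) + 1 = 1 by norm_num, PySem.List.pyRange_one_eq_nil le_rfl] at hv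
    simp only [List.foldl_nil, Nat.cast_zero, sub_zero] at hv
    rw [show pvSeg c (hi - 1) hi = pvSeg c (lo + k) hi by
      rw [show hi - 1 = lo + k by omega]] at hv
    exact hv
  · rw [if_neg hke]
    have hv := pvFoldVal_bwd c hi f mf hmf1 hmf2 hlen (hi - lo - k - 1).toNat (by omega)
    rw [show (((hi - lo - k - 1).toNat : Nat) : Int) = hi - lo - k - 1 by omega,
      show hi - 1 - (hi - lo - k - 1) = lo + k by ring] at hv
    beta_reduce
    exact hv

-- the loop lemma: pvPatLoop is the 'any' of the split conditions over the remaining ks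
theorem pvPatLoop_spec (l : List Char) (c : List Int) (hc : c = l.map pvCode) (lo hi : Int)
    (h0 : 0 ≤ lo) (h2 : hi ≤ (l.length : Int)) (d : Int) (hd : d = 0 ∨ d = 1)
    (pre suf : List Int)
    (hok : ∀ k : Int, 1 ≤ k → k < hi - lo →
      ((if d == 0 then
          decide (PySem.List.pyGetD suf (k - 1) 0 < PySem.List.pyGetD pre (k - 1) 0)
        else
          decide (PySem.List.pyGetD pre (k - 1) 0 < PySem.List.pyGetD suf (k - 1) 0))
        = pvOkSpec c lo hi k d))
    (IH : ∀ lo' hi' d' memo, 0 ≤ lo' → lo' < hi' → hi' ≤ (l.length : Int) → (d' = 0 ∨ d' = 1) →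
      (hi' - lo').toNat < (hi - lo).toNat → MemoOK l memo →
      MemoOK l (pvPat c memo lo' hi' d').1 ∧ (pvPat c memo lo' hi' d').2 = pvSpec l lo' hi' d') :
    ∀ (ks : List {k : Int // k ∈ PySem.List.pyRange 1 (hi - lo) 1})
      (memo : PySem.Dict (Int × Int × Int) Bool), MemoOK l memo →
      MemoOK l (pvPatLoop c memo lo hi d pre suf ks).1 ∧
      (pvPatLoop c memo lo hi d pre suf ks).2 =
        ks.any (fun k => pvOkSpec c lo hi k.1 d && pvSpec l lo (lo + k.1) (1 - d)
          && pvSpec l (lo + k.1) hi (1 - d)) := by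
  intro ks
  induction ks with
  | nil =>
    intro memo hmemo
    simp only [pvPatLoop]
    exact ⟨hmemo, by simp⟩
  | cons k ks ih =>
    intro memo hmemo
    have hkb := PySem.List.mem_pyRange_one.mp k.2
    have hok' := hok k.1 hkb.1 hkb.2
    have hd' : 1 - d = 0 ∨ 1 - d = 1 := by
      rcases hd with rfl | rfl
      · right; norm_num
      · left; norm_num
    have hIH1 := fun memo hm => IH lo (lo + k.1) (1 - d) memo h0 (by omega) (by omega) hd'
      (by omega) hm
    have hIH2 := fun memo hm => IH (lo + k.1) hi (1 - d) memo (by omega) (by omega) h2 hd'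
      (by omega) hm
    simp only [pvPatLoop]
    rw [hok']
    by_cases hc1 : pvOkSpec c lo hi k.1 d = true
    · rw [if_pos hc1]
      obtain ⟨hm1, hv1⟩ := hIH1 memo hmemo
      rw [hv1]
      by_cases hs1 : pvSpec l lo (lo + k.1) (1 - d) = true
      · rw [if_pos hs1]
        obtain ⟨hm2, hv2⟩ := hIH2 _ hm1
        rw [hv2]
        by_cases hs2 : pvSpec l (lo + k.1) hi (1 - d) = true
        · rw [if_pos hs2]
          exact ⟨hm2, by simp [List.any_cons, hc1, hs1, hs2]⟩
        · rw [if_neg hs2]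
          obtain ⟨hm3, hv3⟩ := ih _ hm2
          refine ⟨hm3, ?_⟩
          rw [hv3]
          simp only [Bool.not_eq_true] at hs2
          simp [List.any_cons, hs2]
      · rw [if_neg hs1]
        obtain ⟨hm3, hv3⟩ := ih _ hm1
        refine ⟨hm3, ?_⟩
        rw [hv3]
        simp only [Bool.not_eq_true] at hs1
        simp [List.any_cons, hs1]
    · rw [if_neg hc1]
      obtain ⟨hm3, hv3⟩ := ih _ hmemo
      refine ⟨hm3, ?_⟩
      rw [hv3]
      simp only [Bool.not_eq_true] at hc1
      simp [List.any_cons, hc1]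

theorem pvPreList_val (c : List Int) (lo hi d : Int) (hd : d = 0 ∨ d = 1) (hlo : 0 ≤ lo)
    (hL : 2 ≤ hi - lo) (hlen : hi ≤ (c.length : Int)) (k : Int) (hk1 : 1 ≤ k) (hk2 : k < hi - lo) :
    PySem.List.pyGetD (pvPreList c lo hi d) (k - 1) 0 =
      if d == 0 then pvMinL (pvSeg c lo (lo + k)) else pvMaxL (pvSeg c lo (lo + k)) := by
  rcases hd with rfl | rfl
  · simp only [pvPreList, Int.reduceBEq]
    exact pvArr_fwd c lo (hi - lo) min pvMinL (fun v => by simp [pvMinL])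
      (fun xs v h => pvMinL_append h v) hlo hL (by omega) k hk1 hk2
  · simp only [pvPreList, Int.reduceBEq]
    exact pvArr_fwd c lo (hi - lo) max pvMaxL (fun v => by simp [pvMaxL])
      (fun xs v h => pvMaxL_append h v) hlo hL (by omega) k hk1 hk2

theorem pvSufList_val (c : List Int) (lo hi d : Int) (hd : d = 0 ∨ d = 1) (hlo : 0 ≤ lo)
    (hL : 2 ≤ hi - lo) (hlen : hi ≤ (c.length : Int)) (k : Int) (hk1 : 1 ≤ k) (hk2 : k < hi - lo) :
    PySem.List.pyGetD (pvSufList c lo hi d) (k - 1) 0 =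
      if d == 0 then pvMaxL (pvSeg c (lo + k) hi) else pvMinL (pvSeg c (lo + k) hi) := by
  rcases hd with rfl | rfl
  · simp only [pvSufList, Int.reduceBEq]
    exact pvArr_bwd c lo hi max pvMaxL (fun v => by simp [pvMaxL])
      (fun xs v h => pvMaxL_cons h v) hlo hL hlen k hk1 hk2
  · simp only [pvSufList, Int.reduceBEq]
    exact pvArr_bwd c lo hi min pvMinL (fun v => by simp [pvMinL])
      (fun xs v h => pvMinL_cons h v) hlo hL hlen k hk1 hk2

-- the main invariant: pvPat computes pvSpec and preserves the memo invariant
theorem pvPat_main (l : List Char) (c : List Int) (hc : c = l.map pvCode) :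
    ∀ (N : Nat) (lo hi d : Int) (memo : PySem.Dict (Int × Int × Int) Bool),
      (hi - lo).toNat ≤ N → 0 ≤ lo → lo < hi → hi ≤ (l.length : Int) → (d = 0 ∨ d = 1) →
      MemoOK l memo →
      MemoOK l (pvPat c memo lo hi d).1 ∧ (pvPat c memo lo hi d).2 = pvSpec l lo hi d := by
  intro N
  induction N with
  | zero =>
    intro lo hi d memo hN h0 h1 h2 hd hm
    omega
  | succ N ihN =>
    intro lo hi d memo hN h0 h1 h2 hd hm
    have hclen : (c.length : Int) = (l.length : Int) := by rw [hc]; simp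
    rw [pvPat]
    by_cases hbeq : (hi - lo == 1) = true
    · rw [if_pos hbeq]
      have hone : hi = lo + 1 := by
        have := beq_iff_eq.mp hbeq
        omega
      subst hone
      exact ⟨hm, (pvSpec_base l d h0 (by omega)).symm⟩
    · rw [if_neg hbeq]
      have hL : 2 ≤ hi - lo := by
        have : ¬(hi - lo = 1) := fun h => hbeq (by simp [h])
        omega
      have hok : ∀ kk : Int, 1 ≤ kk → kk < hi - lo →
          ((if d == 0 then
              decide (PySem.List.pyGetD (pvSufList c lo hi d) (kk - 1) 0 <
                PySem.List.pyGetD (pvPreList c lo hi d) (kk - 1) 0)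
            else
              decide (PySem.List.pyGetD (pvPreList c lo hi d) (kk - 1) 0 <
                PySem.List.pyGetD (pvSufList c lo hi d) (kk - 1) 0))
            = pvOkSpec c lo hi kk d) := by
        intro kk hkk1 hkk2
        rw [pvPreList_val c lo hi d hd h0 hL (by omega) kk hkk1 hkk2,
          pvSufList_val c lo hi d hd h0 hL (by omega) kk hkk1 hkk2]
        rcases hd with rfl | rfl
        · simp [pvOkSpec]
        · simp [pvOkSpec]
      have IH' : ∀ lo' hi' d' memo', 0 ≤ lo' → lo' < hi' → hi' ≤ (l.length : Int) →
          (d' = 0 ∨ d' = 1) → (hi' - lo').toNat < (hi - lo).toNat → MemoOK l memo' →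
          MemoOK l (pvPat c memo' lo' hi' d').1 ∧ (pvPat c memo' lo' hi' d').2 = pvSpec l lo' hi' d' :=
        fun lo' hi' d' memo' h0' h1' h2' hd' hlt hm' =>
          ihN lo' hi' d' memo' (by omega) h0' h1' h2' hd' hm'
      cases hget : memo.get? (lo, hi, d) with
      | some b =>
        exact ⟨hm, hm lo hi d b hget⟩
      | none =>
        obtain ⟨hm', hv'⟩ := pvPatLoop_spec l c hc lo hi h0 h2 d hd
          (pvPreList c lo hi d) (pvSufList c lo hi d) hok IH'
          ((PySem.List.pyRange 1 (hi - lo) 1).attach) memo hm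
        have hany : ((PySem.List.pyRange 1 (hi - lo) 1).attach.any
            (fun k => pvOkSpec c lo hi k.1 d && pvSpec l lo (lo + k.1) (1 - d)
              && pvSpec l (lo + k.1) hi (1 - d))) = pvSpec l lo hi d := by
        -- both sides are decided by the same existence of a split, via pvSpec_rec
          rw [Bool.eq_iff_iff, List.any_eq_true,
            pvSpec_rec l d hd h0 (by omega) hL]
          constructor
          · rintro ⟨⟨kk, hmem⟩, -, hp⟩
            have hb := PySem.List.mem_pyRange_one.mp hmem
            simp only [Bool.and_eq_true] at hp
            exact ⟨kk, hb.1, hb.2, by rw [← hc]; exact hp.1.1, hp.1.2, hp.2⟩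
          · rintro ⟨kk, hkk1, hkk2, ho, ha, hb2⟩
            refine ⟨⟨kk, PySem.List.mem_pyRange_one.mpr ⟨hkk1, hkk2⟩⟩, List.mem_attach _ _, ?_⟩
            simp only [Bool.and_eq_true]
            exact ⟨⟨by rw [← hc] at ho; exact ho, ha⟩, hb2⟩
        have hval : (pvPatLoop c memo lo hi d (pvPreList c lo hi d) (pvSufList c lo hi d)
            ((PySem.List.pyRange 1 (hi - lo) 1).attach)).2 = pvSpec l lo hi d := hv'.trans hany
        exact ⟨memoOK_insert hm' hval, hval⟩

-- ===== VERDICT (by name: the statement is the Claim_ definition above) =====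
theorem isPat_spec : Claim_equal_isPat := by
  intro str _
  unfold Spec_isPat
  simp only [isPat, isPat_alt]
  by_cases hsmall : ((str.toList.length : Int)) ≤ 1
  · rw [if_pos hsmall]
    have : str.toList.length = 0 ∨ str.toList.length = 1 := by omega
    rcases this with h | h
    · rw [List.length_eq_zero_iff.mp h, isPatL_nil]
      rfl
    · rw [isPatL_one h, show str.toList.length = 1 from h]
      rfl
  · rw [if_neg hsmall]
    have h2 : 2 ≤ (str.toList.length : Int) := by omega
    obtain ⟨-, hv⟩ := pvPat_main str.toList (str.toList.map pvCode) rfl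
      (str.toList.length) 0 (str.toList.length : Int) 0 PySem.Dict.empty
      (by omega) le_rfl (by omega) le_rfl (Or.inl rfl) (memoOK_empty _)
    rw [hv]
    rw [show pvSpec str.toList 0 (str.toList.length : Int) 0 =
      isPatL (pvSeg str.toList 0 (str.toList.length : Int)) from rfl, pvSeg_all]
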